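-- pv_equiv track=rewrite | github.com/0202alcc/luvatrix | gateflow/src/gateflow/render.py | _render_board_ascii
-- ===== SOURCE A (Python) =====
-- def _render_board_ascii(tasks: list[dict]) -> str:
--     by_status = _tasks_by_status(tasks)
--     lines: list[str] = []
--     for status in sorted(by_status):
--         lines.append(f"[{status}]")
--         rows = by_status[status]
--         if not rows:
--             lines.append("  - (empty)")
--         else:
--             for row in rows:
--                 lines.append(f"  - {row.get('id', '-')}: {row.get('title', '-')}")
--         lines.append("")
--     return "\n".join(lines).rstrip() + "\n"
--
-- def _tasks_by_status(tasks: list[dict]) -> dict[str, list[dict]]: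
--     by_status: dict[str, list[dict]] = {}
--     for row in tasks:
--         status = str(row.get("status", "Intake"))
--         by_status.setdefault(status, []).append(row)
--     for status_rows in by_status.values():
--         status_rows.sort(key=lambda row: str(row.get("id", "")))
--     return by_status
-- ===== SOURCE B (Python) =====
-- def _render_board_ascii(tasks: list[dict]) -> str:
--     status_of = lambda r: str(r.get("status", "Intake"))
--     lines: list[str] = []
--     for status in sorted({status_of(r) for r in tasks}):
--         lines.append(f"[{status}]")
--         group = sorted((r for r in tasks if status_of(r) == status),
--                        key=lambda r: str(r.get("id", "")))
--         for row in group: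
--             lines.append(f"  - {row.get('id', '-')}: {row.get('title', '-')}")
--         lines.append("")
--     return "\n".join(lines).rstrip() + "\n"
-- ===== Notes on version B (the rewrite author's own statement) =====
-- stated objective: alternative
-- what changed: Replaces the setdefault-dict bucket grouping plus per-bucket in-place sort with a dict-free pipeline: sort the distinct statuses once, and for each status filter the task list and sort that group on the fly; the dead '(empty)' branch disappears.
import Mathlib
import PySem

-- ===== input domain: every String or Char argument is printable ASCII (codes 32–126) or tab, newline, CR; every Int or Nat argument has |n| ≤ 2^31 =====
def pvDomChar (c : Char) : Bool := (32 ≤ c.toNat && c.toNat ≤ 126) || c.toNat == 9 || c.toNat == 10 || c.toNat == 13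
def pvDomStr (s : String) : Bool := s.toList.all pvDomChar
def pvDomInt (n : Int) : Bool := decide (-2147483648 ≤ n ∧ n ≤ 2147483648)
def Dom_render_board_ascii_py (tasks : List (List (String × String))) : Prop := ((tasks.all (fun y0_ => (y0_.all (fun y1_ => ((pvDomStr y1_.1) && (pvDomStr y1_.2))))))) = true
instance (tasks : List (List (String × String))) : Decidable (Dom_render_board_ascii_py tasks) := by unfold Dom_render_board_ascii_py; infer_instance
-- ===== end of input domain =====

-- B replaces A's setdefault-dict bucketing + per-bucket in-place sort by a dict-free pipeline
-- (sort the distinct statuses, then filter-and-sort each group from the task list); same output.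

-- shared primitive: Python's row.get(key, default) on a dict row (first-match lookup)
def pyRowGet (row : List (String × String)) (k d : String) : String :=
  (PySem.Dict.mk row).getD k d

-- ===== PORT A =====
-- _tasks_by_status: 'by_status.setdefault(status, []).append(row)' is d.modify status [] (· ++ [row]);
-- the second loop sorts every bucket value in place (expressed as the items-level value update)
def tasks_by_status_py (tasks : List (List (String × String))) :
    PySem.Dict String (List (List (String × String))) :=
  let by_status := tasks.foldl
    (fun d row => d.modify (pyRowGet row "status" "Intake") [] (fun v => v ++ [row]))
    PySem.Dict.empty
  PySem.Dict.mk (by_status.items.map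
    (fun p => (p.1, PySem.List.sorted p.2 (fun row => pyRowGet row "id" "") false)))

def render_board_ascii_py (tasks : List (List (String × String))) : String :=
  let by_status := tasks_by_status_py tasks
  let lines : List String :=
    (PySem.List.sorted by_status.keys (fun s => s) false).foldl
      (fun lines status =>
        let lines := lines ++ ["[" ++ status ++ "]"]
        -- by_status[status]: status always is a key here, so getD is exact (no KeyError)
        let rows := by_status.getD status []
        let lines :=
          if rows = [] then lines ++ ["  - (empty)"]
          else rows.foldl
            (fun lines row =>
              lines ++ ["  - " ++ pyRowGet row "id" "-" ++ ": " ++ pyRowGet row "title" "-"]) lines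
        lines ++ [""]) []
  PySem.Str.rstrip (PySem.Str.join "\n" lines) ++ "\n"

-- ===== PORT B =====
def pvStatusOf (row : List (String × String)) : String := pyRowGet row "status" "Intake"

def pvRowLine (row : List (String × String)) : String :=
  "  - " ++ pyRowGet row "id" "-" ++ ": " ++ pyRowGet row "title" "-"

def render_board_ascii_py_alt (tasks : List (List (String × String))) : String :=
  let lines : List String :=
    (PySem.List.sorted (PySem.Set.ofList (tasks.map pvStatusOf)) (fun s => s) false).foldl
      (fun lines status =>
        lines ++ (["[" ++ status ++ "]"] ++
          (PySem.List.sorted (tasks.filter (fun r => pvStatusOf r == status))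
              (fun r => pyRowGet r "id" "") false).map pvRowLine ++ [""])) []
  PySem.Str.rstrip (PySem.Str.join "\n" lines) ++ "\n"

-- ===== PRECONDITION & SPEC =====
def Spec_render_board_ascii_py (tasks : List (List (String × String))) (out : String) : Prop := out = render_board_ascii_py_alt tasks
instance (tasks : List (List (String × String))) (out : String) : Decidable (Spec_render_board_ascii_py tasks out) := by unfold Spec_render_board_ascii_py; infer_instance

-- ===== CLAIM (what is proved, stated in full; the proofs are below) =====
def Claim_equal_render_board_ascii_py : Prop := ∀ (tasks : List (List (String × String))), Dom_render_board_ascii_py tasks → Spec_render_board_ascii_py tasks (render_board_ascii_py tasks)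

-- ===== LEMMAS AND PROOFS =====

-- the grouping fold, named for the proofs
def pvBuckets (tasks : List (List (String × String))) :
    PySem.Dict String (List (List (String × String))) :=
  tasks.foldl
    (fun d row => d.modify (pyRowGet row "status" "Intake") [] (fun v => v ++ [row]))
    PySem.Dict.empty

theorem pvBuckets_keys (tasks : List (List (String × String))) :
    (pvBuckets tasks).keys = PySem.Set.ofList (tasks.map pvStatusOf) := by
  unfold pvBuckets
  rw [PySem.Dict.keys_foldl_modify_key tasks (fun row => pyRowGet row "status" "Intake") []
      (fun _ row v => v ++ [row]) PySem.Dict.empty]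
  rfl

theorem pvBuckets_getD (tasks : List (List (String × String))) (s : String) :
    (pvBuckets tasks).getD s [] = tasks.filter (fun r => pvStatusOf r == s) := by
  show (tasks.foldl
      (fun d row => d.modify (pyRowGet row "status" "Intake") [] (fun v => v ++ [row]))
      PySem.Dict.empty).getD s [] = _
  have h : tasks.foldl
      (fun d row => d.modify (pyRowGet row "status" "Intake") [] (fun v => v ++ [row]))
      PySem.Dict.empty
      = (tasks.map (fun r => (pvStatusOf r, r))).foldl
          (fun d p => d.modify p.1 [] (fun v => v ++ [p.2])) PySem.Dict.empty := by
    rw [List.foldl_map]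
    rfl
  rw [h, PySem.Dict.getD_foldl_modify_append]
  simp [PySem.Dict.getD_empty, List.filter_map, Function.comp_def]

theorem pvTbs_items (tasks : List (List (String × String))) :
    (tasks_by_status_py tasks).items = (pvBuckets tasks).items.map
      (fun p => (p.1, PySem.List.sorted p.2 (fun row => pyRowGet row "id" "") false)) := rfl

theorem pvTbs_keys (tasks : List (List (String × String))) :
    (tasks_by_status_py tasks).keys = PySem.Set.ofList (tasks.map pvStatusOf) := by
  rw [← pvBuckets_keys tasks]
  simp only [PySem.Dict.keys, pvTbs_items, List.map_map, Function.comp_def]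

theorem pvTbs_getD (tasks : List (List (String × String))) (s : String)
    (hs : s ∈ PySem.Set.ofList (tasks.map pvStatusOf)) :
    (tasks_by_status_py tasks).getD s []
      = PySem.List.sorted (tasks.filter (fun r => pvStatusOf r == s))
          (fun r => pyRowGet r "id" "") false := by
  have hnd : (pvBuckets tasks).keys.Nodup := by
    rw [pvBuckets_keys]; exact PySem.Set.nodup_ofList _
  have hitems : (tasks_by_status_py tasks).items
      = (pvBuckets tasks).keys.map
          (fun k => (k, PySem.List.sorted ((pvBuckets tasks).getD k [])
                          (fun row => pyRowGet row "id" "") false)) := by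
    rw [pvTbs_items, PySem.Dict.items_eq_map_keys (pvBuckets tasks) hnd []]
    simp [List.map_map, Function.comp_def]
  have hnd' : (tasks_by_status_py tasks).keys.Nodup := by
    rw [pvTbs_keys]; exact PySem.Set.nodup_ofList _
  have hmem : (s, PySem.List.sorted ((pvBuckets tasks).getD s [])
      (fun row => pyRowGet row "id" "") false) ∈ (tasks_by_status_py tasks).items := by
    rw [hitems]
    exact List.mem_map.mpr ⟨s, by rw [pvBuckets_keys]; exact hs, rfl⟩
  rw [PySem.Dict.getD_of_mem_items _ hmem hnd', pvBuckets_getD]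

theorem pvFilter_ne_nil (tasks : List (List (String × String))) (s : String)
    (hs : s ∈ PySem.Set.ofList (tasks.map pvStatusOf)) :
    tasks.filter (fun r => pvStatusOf r == s) ≠ [] := by
  rw [PySem.Set.mem_ofList] at hs
  obtain ⟨r, hr, hrs⟩ := List.mem_map.mp hs
  intro hnil
  have : r ∈ tasks.filter (fun r => pvStatusOf r == s) :=
    List.mem_filter.mpr ⟨hr, by simp [hrs]⟩
  simp [hnil] at this

-- ===== VERDICT (by name: the statement is the Claim_ definition above) =====
theorem render_board_ascii_py_spec : Claim_equal_render_board_ascii_py := by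
  intro tasks _
  show render_board_ascii_py tasks = render_board_ascii_py_alt tasks
  simp only [render_board_ascii_py, render_board_ascii_py_alt, pvTbs_keys]
  refine congrArg (fun l => PySem.Str.rstrip (PySem.Str.join "\n" l) ++ "\n") ?_
  apply PySem.List.foldl_congr_mem
  intro acc s hsmem
  have hs : s ∈ PySem.Set.ofList (tasks.map pvStatusOf) :=
    (PySem.List.mem_sorted _ _ _ _).mp hsmem
  have hne : PySem.List.sorted (tasks.filter (fun r => pvStatusOf r == s))
      (fun r => pyRowGet r "id" "") false ≠ [] := by
    rw [Ne, PySem.List.sorted_eq_nil_iff]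
    exact pvFilter_ne_nil tasks s hs
  simp only [pvTbs_getD tasks s hs, if_neg hne, PySem.List.foldl_append_singleton_eq_map]
  simp [pvRowLine]
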